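-- pv_equiv track=rewrite | github.com/Lucenix/LA2 | treino2/erdos.py | erdos
-- ===== SOURCE A (Python) =====
-- def erdos(artigos,n):
--     grafo = dict()
--     for artigo in artigos:
--         conj = artigos[artigo]
--         for pessoa in conj:
--             if pessoa not in grafo:
--                 grafo[pessoa] = set(conj)
--             else:
--                 grafo[pessoa] = grafo[pessoa].union(conj)
--             grafo[pessoa].remove(pessoa)
--     dist = {}
--     if "Paul Erdos" in grafo:
--         queue = ["Paul Erdos"]
--         vis = {"Paul Erdos"}
--         dist["Paul Erdos"] = 0
--         while queue:
--             v = queue.pop(0)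
--             for adj in grafo[v]:
--                 if adj not in vis:
--                     queue.append(adj)
--                     vis.add(adj)
--                     dist[adj] = dist[v] + 1
--     #se pedir n para todos
--     #for left in grafo:
--     #    if left not in dist:
--     #        dist[left] = float("inf")
--     return sorted(list(filter(lambda i: dist[i]<=n, dist)), key = lambda i: (dist[i], i))
-- ===== SOURCE B (Python) =====
-- def erdos(artigos, n):
--     # Bellman-Ford-style relaxation over the article author-lists themselves:
--     # no coauthor adjacency graph is ever built and no BFS queue is used.
--     vals = list(artigos.values())
--     dist = {}
--     if any("Paul Erdos" in conj for conj in vals):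
--         dist["Paul Erdos"] = 0
--         people = {p for conj in vals for p in conj}
--         for _ in range(len(people)):
--             for conj in vals:
--                 known = [dist[p] for p in conj if p in dist]
--                 if known:
--                     m = min(known) + 1
--                     for p in conj:
--                         if p not in dist or dist[p] > m:
--                             dist[p] = m
--     return sorted((i for i in dist if dist[i] <= n), key=lambda i: (dist[i], i))
-- ===== Notes on version B (the rewrite author's own statement) =====
-- stated objective: faster
-- what changed: A builds an explicit coauthor adjacency graph of sets and runs a FIFO-queue BFS from 'Paul Erdos'; B never builds a graph at all and instead runs Bellman-Ford-style distance relaxation directly over the article author lists (treated as hyperedges), bounded by |people| passes in which each article relaxes all its authors to min(known dists)+1, converging to the same shortest-distance map.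
import Mathlib
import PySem

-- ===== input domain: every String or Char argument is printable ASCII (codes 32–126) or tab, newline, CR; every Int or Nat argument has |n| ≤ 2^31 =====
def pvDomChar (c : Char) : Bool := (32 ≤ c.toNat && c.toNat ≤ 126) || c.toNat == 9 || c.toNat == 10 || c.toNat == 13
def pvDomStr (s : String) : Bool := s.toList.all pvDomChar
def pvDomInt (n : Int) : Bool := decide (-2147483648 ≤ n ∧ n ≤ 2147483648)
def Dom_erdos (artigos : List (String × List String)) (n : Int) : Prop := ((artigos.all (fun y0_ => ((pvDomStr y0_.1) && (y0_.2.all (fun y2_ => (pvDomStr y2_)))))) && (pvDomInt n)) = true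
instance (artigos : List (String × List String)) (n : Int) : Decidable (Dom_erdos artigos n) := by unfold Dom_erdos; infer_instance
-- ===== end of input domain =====

-- B replaces A's whole graph phase: A builds a coauthor adjacency graph of sets and runs a
-- FIFO-queue BFS from "Paul Erdos"; B builds no graph at all and instead runs Bellman-Ford-style
-- relaxation directly over the article author lists (hyperedges), |people| passes of
-- "relax every author of every article to min(known dists)+1".  Python set/dict iteration
-- orders do not affect the result: it is sorted by (distance, name).

-- ===== PORT A =====
-- one inner BFS step of A: 'for adj in grafo[v]: if adj not in vis: append/add/dist[adj]=dist[v]+1'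
def bfsAStep (v : String) (st : List String × PySem.Set String × PySem.Dict String Int)
    (adj : String) : List String × PySem.Set String × PySem.Dict String Int :=
  if PySem.Set.contains st.2.1 adj = false then
    (st.1 ++ [adj], PySem.Set.add st.2.1 adj, st.2.2.insert adj ((st.2.2.get? v).getD 0 + 1))
  else st
-- dist[v] is ported as (get? v).getD 0: v was popped from the queue, so v ∈ dist — no KeyError.

-- universe of possible discoveries, for termination only
def erdosUniv (grafo : PySem.Dict String (PySem.Set String)) : Finset String :=
  (grafo.values.flatten).toFinset

theorem mem_flatten_of_mem_getD (grafo : PySem.Dict String (PySem.Set String)) (v a : String)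
    (h : a ∈ grafo.getD v []) : a ∈ grafo.values.flatten := by
  unfold PySem.Dict.getD at h
  cases hf : grafo.get? v with
  | none => rw [hf] at h; simp at h
  | some s =>
    rw [hf] at h
    simp only [Option.getD_some] at h
    unfold PySem.Dict.get? at hf
    cases hfind : List.find? (fun p => p.1 == v) grafo.items with
    | none => rw [hfind] at hf; simp at hf
    | some p =>
      rw [hfind] at hf
      simp only [Option.map_some] at hf
      have hp : p ∈ grafo.items := List.mem_of_find?_eq_some hfind
      have : s ∈ grafo.values := by
        unfold PySem.Dict.values
        have hps : p.2 = s := by injection hf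
        exact List.mem_map.mpr ⟨p, hp, hps⟩
      exact List.mem_flatten.mpr ⟨s, this, h⟩

theorem bfsAStep_shape (v : String) : ∀ (adjs q : List String) (vis : PySem.Set String)
    (dist : PySem.Dict String Int), ∃ add : List String,
    (adjs.foldl (bfsAStep v) (q, vis, dist)).1 = q ++ add ∧
    (adjs.foldl (bfsAStep v) (q, vis, dist)).2.1 = vis ++ add ∧
    add.Nodup ∧ (∀ a ∈ add, a ∈ adjs ∧ a ∉ vis) := by
  intro adjs
  induction adjs with
  | nil => intro q vis dist; exact ⟨[], by simp⟩
  | cons adj rest ih =>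
    intro q vis dist
    by_cases hc : PySem.Set.contains vis adj = false
    · have hmem : adj ∉ vis := by
        simpa using hc
      have hstep : bfsAStep v (q, vis, dist) adj
          = (q ++ [adj], vis ++ [adj], dist.insert adj ((dist.get? v).getD 0 + 1)) := by
        simp only [bfsAStep, hc, if_true]
        rw [PySem.Set.add_of_not_mem hmem]
      obtain ⟨add', h1, h2, hnd, hm⟩ := ih (q ++ [adj]) (vis ++ [adj])
        (dist.insert adj ((dist.get? v).getD 0 + 1))
      refine ⟨adj :: add', ?_, ?_, ?_, ?_⟩
      · simp only [List.foldl_cons, hstep, h1, List.append_assoc, List.singleton_append]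
      · simp only [List.foldl_cons, hstep, h2, List.append_assoc, List.singleton_append]
      · exact List.nodup_cons.mpr ⟨fun hx => by
          have := (hm adj hx).2; simp at this, hnd⟩
      · intro a ha
        rcases List.mem_cons.mp ha with rfl | ha
        · exact ⟨List.mem_cons_self, hmem⟩
        · refine ⟨List.mem_cons_of_mem _ (hm a ha).1, fun hv => ?_⟩
          exact (hm a ha).2 (by simp [hv])
    · have hc' : PySem.Set.contains vis adj = true := by
        cases h : PySem.Set.contains vis adj
        · exact absurd h hc
        · rfl
      have hmm : adj ∈ vis := (PySem.Set.contains_iff vis adj).mp hc'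
      have hstep : bfsAStep v (q, vis, dist) adj = (q, vis, dist) := by
        simp [bfsAStep, hmm]
      obtain ⟨add', h1, h2, hnd, hm⟩ := ih q vis dist
      refine ⟨add', ?_, ?_, hnd, ?_⟩
      · simp only [List.foldl_cons, hstep, h1]
      · simp only [List.foldl_cons, hstep, h2]
      · exact fun a ha => ⟨List.mem_cons_of_mem _ (hm a ha).1, (hm a ha).2⟩

theorem card_drop (B : Finset String) (vis add : List String) (hnd : add.Nodup)
    (hsub : ∀ a ∈ add, a ∈ B) (hdis : ∀ a ∈ add, a ∉ vis) :
    (B \ (vis ++ add).toFinset).card + add.length = (B \ vis.toFinset).card := by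
  have h2 : B \ (vis ++ add).toFinset = (B \ vis.toFinset) \ add.toFinset := by
    ext x
    simp only [Finset.mem_sdiff, List.mem_toFinset, List.mem_append]
    tauto
  have hss : add.toFinset ⊆ B \ vis.toFinset := by
    intro x hx
    rw [List.mem_toFinset] at hx
    exact Finset.mem_sdiff.mpr ⟨hsub x hx, by
      rw [List.mem_toFinset]; exact hdis x hx⟩
  have hle := Finset.card_le_card hss
  rw [List.toFinset_card_of_nodup hnd] at hle
  rw [h2, Finset.card_sdiff_of_subset hss, List.toFinset_card_of_nodup hnd]
  omega

-- A's BFS loop: 'while queue: v = queue.pop(0); for adj in grafo[v]: …'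
-- grafo[v] is ported as getD v []: every queued v is a key of grafo — no KeyError.
def erdosBfsA (grafo : PySem.Dict String (PySem.Set String)) :
    List String → PySem.Set String → PySem.Dict String Int → PySem.Dict String Int
  | [], _, dist => dist
  | v :: rest, vis, dist =>
    erdosBfsA grafo ((grafo.getD v []).foldl (bfsAStep v) (rest, vis, dist)).1
      ((grafo.getD v []).foldl (bfsAStep v) (rest, vis, dist)).2.1
      ((grafo.getD v []).foldl (bfsAStep v) (rest, vis, dist)).2.2
  termination_by q vis _ => 2 * ((erdosUniv grafo) \ vis.toFinset).card + q.length
  decreasing_by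
    obtain ⟨add, h1, h2, hnd, hmem⟩ := bfsAStep_shape v (grafo.getD v []) rest vis dist
    rw [h1, h2]
    have hdrop := card_drop (erdosUniv grafo) vis add hnd
      (fun a ha => by
        have := (hmem a ha).1
        simp only [erdosUniv, List.mem_toFinset]
        exact mem_flatten_of_mem_getD grafo v a this)
      (fun a ha => (hmem a ha).2)
    simp only [List.length_append, List.length_cons]
    omega

-- 'if "Paul Erdos" in grafo: queue = ["Paul Erdos"]; vis = {"Paul Erdos"}; dist["Paul Erdos"] = 0; …'
def erdosDistA (grafo : PySem.Dict String (PySem.Set String)) : PySem.Dict String Int :=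
  if grafo.contains "Paul Erdos" then
    erdosBfsA grafo ["Paul Erdos"] (PySem.Set.ofList ["Paul Erdos"])
      (PySem.Dict.empty.insert "Paul Erdos" 0)
  else PySem.Dict.empty

-- graph building: 'for artigo in artigos (a dict): conj = artigos[artigo]; for pessoa in conj: …'
def erdosGraphA (artigos : List (String × List String)) : PySem.Dict String (PySem.Set String) :=
  (PySem.Dict.ofList artigos).items.foldl (fun grafo artigo =>
    ((PySem.Dict.ofList artigos).getD artigo.1 []).foldl (fun g pessoa =>
      g.insert pessoa (PySem.Set.discard
        (if g.contains pessoa = false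
         then PySem.Set.ofList ((PySem.Dict.ofList artigos).getD artigo.1 [])
         else PySem.Set.union (g.getD pessoa PySem.Set.empty)
                ((PySem.Dict.ofList artigos).getD artigo.1 []))
        pessoa)) grafo) PySem.Dict.empty
-- '.remove(pessoa)' never raises (pessoa ∈ conj ⊆ the stored set); Set.discard is exact here.

def erdos (artigos : List (String × List String)) (n : Int) : List String :=
  PySem.List.sorted2
    (((erdosDistA (erdosGraphA artigos)).keys).filter
      (fun i => decide ((erdosDistA (erdosGraphA artigos)).getD i 0 ≤ n)))
    (fun i => (erdosDistA (erdosGraphA artigos)).getD i 0) (fun i => i)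
-- dist[i] in the filter/key is ported as getD i 0: i ranges over dist's keys — no KeyError.

-- ===== PORT B =====
-- 'if p not in dist or dist[p] > m: dist[p] = m'
def relaxPerson (m : Int) (d : PySem.Dict String Int) (p : String) : PySem.Dict String Int :=
  if d.contains p = false ∨ m < d.getD p 0 then d.insert p m else d
-- dist[p] in the comparison is ported as getD p 0: it is read only when p is a key.

-- one article: 'known = [dist[p] for p in conj if p in dist]; if known: m = min(known)+1; …'
def relaxConj (dist : PySem.Dict String Int) (conj : List String) : PySem.Dict String Int :=
  match PySem.List.min? ((conj.filter (fun p => dist.contains p)).map (fun p => dist.getD p 0))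
      (fun x => x) with
  | none => dist
  | some mn => conj.foldl (relaxPerson (mn + 1)) dist
-- 'if known:' is the 'some' branch: min? is none exactly on the empty list.

-- 'for _ in range(len(people)): for conj in vals: …'
def erdosRoundsB (vals : List (List String)) : Nat → PySem.Dict String Int → PySem.Dict String Int
  | 0, dist => dist
  | k + 1, dist => erdosRoundsB vals k (vals.foldl relaxConj dist)

-- 'dist = {}; if any("Paul Erdos" in conj for conj in vals): dist["Paul Erdos"] = 0; people = {…}; …'
def erdosDistB (vals : List (List String)) : PySem.Dict String Int :=
  if vals.any (fun conj => conj.contains "Paul Erdos") then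
    erdosRoundsB vals (PySem.Set.ofList vals.flatten).length (PySem.Dict.empty.insert "Paul Erdos" 0)
  else PySem.Dict.empty

def erdos_alt (artigos : List (String × List String)) (n : Int) : List String :=
  PySem.List.sorted2
    (((erdosDistB (PySem.Dict.ofList artigos).values).keys).filter
      (fun i => decide ((erdosDistB (PySem.Dict.ofList artigos).values).getD i 0 ≤ n)))
    (fun i => (erdosDistB (PySem.Dict.ofList artigos).values).getD i 0) (fun i => i)

-- ===== PRECONDITION & SPEC =====
def Spec_erdos (artigos : List (String × List String)) (n : Int) (out : List String) : Prop := out = erdos_alt artigos n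
instance (artigos : List (String × List String)) (n : Int) (out : List String) : Decidable (Spec_erdos artigos n out) := by unfold Spec_erdos; infer_instance

-- ===== CLAIM (what is proved, stated in full; the proofs are below) =====
def Claim_equal_erdos : Prop := ∀ (artigos : List (String × List String)) (n : Int), Dom_erdos artigos n → Spec_erdos artigos n (erdos artigos n)


-- ===== LEMMAS AND PROOFS =====

-- sorted(xs, key=lambda i: (dist[i], i)) is a sort by one lexicographic linear key
theorem sorted2_eq_sorted_lex (xs : List String) (k1 : String → Int) :
    PySem.List.sorted2 xs k1 (fun x => x)
      = PySem.List.sorted xs (fun x => toLex (k1 x, x)) := by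
  rw [PySem.List.sorted_eq_foldl_insertBy]
  show List.foldl (fun acc x => PySem.List.insertBy
      (fun a b => decide (k1 a < k1 b) || (!decide (k1 b < k1 a) && decide (a < b))) x acc) [] xs
    = _
  congr 1
  funext acc x
  congr 1
  funext a b
  rcases lt_trichotomy (k1 a) (k1 b) with h | h | h
  · simp [h, lt_asymm h, Prod.Lex.lt_iff]
  · simp [h, Prod.Lex.lt_iff]
  · simp [h, lt_asymm h, ne_of_gt h, Prod.Lex.lt_iff]

theorem lexkey_injective (k1 : String → Int) :
    Function.Injective (fun x => toLex (k1 x, x)) := by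
  intro a b h
  have := congrArg (fun z => (ofLex z).2) h
  simpa using this

-- coauthorship edge, read off the article author lists (hyperedges)
def EdgeIn (vals : List (List String)) (u v : String) : Prop :=
  ∃ conj ∈ vals, u ∈ conj ∧ v ∈ conj ∧ v ≠ u

-- "reachable from Paul Erdos in at most d coauthor steps"
inductive Reach (vals : List (List String)) : Nat → String → Prop
  | base : Reach vals 0 "Paul Erdos"
  | mono {d p} : Reach vals d p → Reach vals (d + 1) p
  | step {d u v conj} : Reach vals d u → conj ∈ vals → u ∈ conj → v ∈ conj → v ≠ u →
      Reach vals (d + 1) v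

theorem reach_zero {vals p} (h : Reach vals 0 p) : p = "Paul Erdos" := by
  cases h; rfl

-- the shape shared by A's final BFS map and B's final relaxation map
def GoodDist (vals : List (List String)) (dist : PySem.Dict String Int) : Prop :=
  dist.get? "Paul Erdos" = some 0 ∧
  (∀ p x, dist.get? p = some x → ∃ k : Nat, x = (k : Int) ∧ Reach vals k p) ∧
  (∀ p (k : Nat), dist.get? p = some (k : Int) → ∀ v, EdgeIn vals p v →
    ∃ k' : Nat, k' ≤ k + 1 ∧ dist.get? v = some (k' : Int))

theorem good_keyed_of_reach {vals dist} (h : GoodDist vals dist) :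
    ∀ {k p}, Reach vals k p → ∃ m : Nat, m ≤ k ∧ dist.get? p = some (m : Int) := by
  intro k p hr
  induction hr with
  | base => exact ⟨0, le_refl 0, h.1⟩
  | mono _ ih =>
    obtain ⟨m, hm, hg⟩ := ih
    exact ⟨m, by omega, hg⟩
  | @step d u v conj _ hconj hu hv hne ih =>
    obtain ⟨m, hm, hg⟩ := ih
    obtain ⟨k', hk', hg'⟩ := h.2.2 u m hg v ⟨conj, hconj, hu, hv, hne⟩
    exact ⟨k', by omega, hg'⟩

theorem good_unique {vals d1 d2} (h1 : GoodDist vals d1) (h2 : GoodDist vals d2) :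
    ∀ p, d1.get? p = d2.get? p := by
  intro p
  cases hg : d1.get? p with
  | some x =>
    obtain ⟨k, rfl, hr⟩ := h1.2.1 p x hg
    obtain ⟨m2, hm2, hg2⟩ := good_keyed_of_reach h2 hr
    obtain ⟨k2, hx2, hr2⟩ := h2.2.1 p _ hg2
    have hk2 : k2 = m2 := by exact_mod_cast hx2.symm
    obtain ⟨m1, hm1, hg1⟩ := good_keyed_of_reach h1 (hk2 ▸ hr2)
    rw [hg] at hg1
    have : m1 = k := by
      have := Option.some.inj hg1
      exact_mod_cast this.symm
    have : k = m2 := by omega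
    rw [hg2, this]
  | none =>
    cases hg2 : d2.get? p with
    | none => rfl
    | some y =>
      obtain ⟨k2, rfl, hr2⟩ := h2.2.1 p y hg2
      obtain ⟨m1, _, hg1⟩ := good_keyed_of_reach h1 hr2
      rw [hg] at hg1
      cases hg1

-- ---- characterization of A's graph build ----

theorem gcInner (conj : List String) (B : String → String → Prop) (P : String → Prop)
    (hBP : ∀ u v, B u v → P u) (hBne : ∀ u v, B u v → v ≠ u) :
    ∀ (l : List String) (g : PySem.Dict String (PySem.Set String)) (D : String → Prop),
    (∀ x ∈ l, x ∈ conj) →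
    (∀ u, D u → u ∈ conj) →
    (∀ u v, v ∈ g.getD u [] ↔ (B u v ∨ (D u ∧ v ∈ conj ∧ v ≠ u))) →
    (∀ u, g.contains u = true ↔ (P u ∨ D u)) →
    (∀ u v, v ∈ (l.foldl (fun g pessoa =>
        g.insert pessoa (PySem.Set.discard
          (if g.contains pessoa = false then PySem.Set.ofList conj
           else PySem.Set.union (g.getD pessoa PySem.Set.empty) conj) pessoa)) g).getD u []
      ↔ (B u v ∨ ((D u ∨ u ∈ l) ∧ v ∈ conj ∧ v ≠ u))) ∧
    (∀ u, (l.foldl (fun g pessoa =>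
        g.insert pessoa (PySem.Set.discard
          (if g.contains pessoa = false then PySem.Set.ofList conj
           else PySem.Set.union (g.getD pessoa PySem.Set.empty) conj) pessoa)) g).contains u = true
      ↔ (P u ∨ (D u ∨ u ∈ l))) := by
  intro l
  induction l with
  | nil =>
    intro g D _ _ hg hc
    constructor
    · intro u v; rw [List.foldl_nil, hg]; simp
    · intro u; rw [List.foldl_nil, hc]; simp
  | cons p0 rest ih =>
    intro g D hl hD hg hc
    set val := PySem.Set.discard
      (if g.contains p0 = false then PySem.Set.ofList conj
       else PySem.Set.union (g.getD p0 PySem.Set.empty) conj) p0 with hval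
    have hp0conj : p0 ∈ conj := hl p0 List.mem_cons_self
    have hvalmem : ∀ v, v ∈ val ↔ ((B p0 v ∨ v ∈ conj) ∧ v ≠ p0) := by
      intro v
      rw [hval]
      by_cases hcp : g.contains p0 = false
      · have hnB : ¬ B p0 v := fun hB => by
          have := (hc p0).mpr (Or.inl (hBP _ _ hB)); rw [hcp] at this; cases this
        rw [if_pos hcp, PySem.Set.mem_discard, PySem.Set.mem_ofList]
        constructor
        · rintro ⟨hv, hne⟩; exact ⟨Or.inr hv, hne⟩
        · rintro ⟨hv | hv, hne⟩; exact absurd hv hnB; exact ⟨hv, hne⟩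
      · rw [if_neg hcp, PySem.Set.mem_discard, PySem.Set.mem_union]
        have : g.getD p0 PySem.Set.empty = g.getD p0 [] := rfl
        rw [this, hg]
        constructor
        · rintro ⟨hv | hv, hne⟩
          · rcases hv with hB | ⟨_, hv, _⟩
            · exact ⟨Or.inl hB, hne⟩
            · exact ⟨Or.inr hv, hne⟩
          · exact ⟨Or.inr hv, hne⟩
        · rintro ⟨hB | hv, hne⟩
          · exact ⟨Or.inl (Or.inl hB), hne⟩
          · exact ⟨Or.inr hv, hne⟩
    have hg' : ∀ u v, v ∈ (g.insert p0 val).getD u []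
        ↔ (B u v ∨ ((fun u => D u ∨ u = p0) u ∧ v ∈ conj ∧ v ≠ u)) := by
      intro u v
      by_cases hu : u = p0
      · rw [hu, PySem.Dict.getD_insert_self g p0 val [], hvalmem]
        constructor
        · rintro ⟨hB | hv, hne⟩
          · exact Or.inl hB
          · exact Or.inr ⟨Or.inr rfl, hv, hne⟩
        · rintro (hB | ⟨_, hv, hne⟩)
          · exact ⟨Or.inl hB, hBne _ _ hB⟩
          · exact ⟨Or.inr hv, hne⟩
      · rw [PySem.Dict.getD_insert_of_ne g val [] hu, hg]
        constructor
        · rintro (hB | ⟨hD', hv, hne⟩)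
          · exact Or.inl hB
          · exact Or.inr ⟨Or.inl hD', hv, hne⟩
        · rintro (hB | ⟨hD' | hD', hv, hne⟩)
          · exact Or.inl hB
          · exact Or.inr ⟨hD', hv, hne⟩
          · exact absurd hD' hu
    have hc' : ∀ u, (g.insert p0 val).contains u = true ↔ (P u ∨ ((fun u => D u ∨ u = p0) u)) := by
      intro u
      rw [PySem.Dict.contains_insert]
      simp only [Bool.or_eq_true, beq_iff_eq]
      rw [hc]
      tauto
    obtain ⟨m1, m2⟩ := ih (g.insert p0 val) (fun u => D u ∨ u = p0)
      (fun x hx => hl x (List.mem_cons_of_mem _ hx))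
      (fun u hu => by rcases hu with hu | rfl; exact hD u hu; exact hp0conj) hg' hc'
    constructor
    · intro u v
      rw [List.foldl_cons]
      rw [← hval, m1]
      simp only [List.mem_cons]
      tauto
    · intro u
      rw [List.foldl_cons, ← hval, m2]
      simp only [List.mem_cons]
      tauto

theorem gcOuter :
    ∀ (its : List (String × List String)) (g : PySem.Dict String (PySem.Set String))
      (B : String → String → Prop) (P : String → Prop),
    (∀ u v, B u v → P u) → (∀ u v, B u v → v ≠ u) →
    (∀ u v, v ∈ g.getD u [] ↔ B u v) →
    (∀ u, g.contains u = true ↔ P u) →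
    (∀ u v, v ∈ (its.foldl (fun g artigo => artigo.2.foldl (fun g pessoa =>
        g.insert pessoa (PySem.Set.discard
          (if g.contains pessoa = false then PySem.Set.ofList artigo.2
           else PySem.Set.union (g.getD pessoa PySem.Set.empty) artigo.2) pessoa)) g) g).getD u []
      ↔ (B u v ∨ EdgeIn (its.map (·.2)) u v)) ∧
    (∀ u, (its.foldl (fun g artigo => artigo.2.foldl (fun g pessoa =>
        g.insert pessoa (PySem.Set.discard
          (if g.contains pessoa = false then PySem.Set.ofList artigo.2
           else PySem.Set.union (g.getD pessoa PySem.Set.empty) artigo.2) pessoa)) g) g).contains u = true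
      ↔ (P u ∨ u ∈ (its.map (·.2)).flatten)) := by
  intro its
  induction its with
  | nil =>
    intro g B P _ _ hg hc
    constructor
    · intro u v
      rw [List.foldl_nil, hg]
      simp [EdgeIn]
    · intro u
      rw [List.foldl_nil, hc]
      simp
  | cons art rest ih =>
    intro g B P hBP hBne hg hc
    obtain ⟨i1, i2⟩ := gcInner art.2 B P hBP hBne art.2 g (fun _ => False)
      (fun x hx => hx) (fun u h => h.elim)
      (by intro u v; rw [hg]; tauto)
      (by intro u; rw [hc]; tauto)
    obtain ⟨m1, m2⟩ := ih (art.2.foldl (fun g pessoa =>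
        g.insert pessoa (PySem.Set.discard
          (if g.contains pessoa = false then PySem.Set.ofList art.2
           else PySem.Set.union (g.getD pessoa PySem.Set.empty) art.2) pessoa)) g)
      (fun u v => B u v ∨ (u ∈ art.2 ∧ v ∈ art.2 ∧ v ≠ u))
      (fun u => P u ∨ u ∈ art.2)
      (by rintro u v (hB | ⟨hu, _, _⟩); exact Or.inl (hBP _ _ hB); exact Or.inr hu)
      (by rintro u v (hB | ⟨_, _, hne⟩); exact hBne _ _ hB; exact hne)
      (by intro u v; rw [i1]; tauto)
      (by intro u; rw [i2]; tauto)
    constructor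
    · intro u v
      rw [List.foldl_cons, m1]
      simp only [List.map_cons, EdgeIn, List.mem_cons]
      constructor
      · rintro ((hB | ⟨hu, hv, hne⟩) | ⟨c, hcm, hu, hv, hne⟩)
        · exact Or.inl hB
        · exact Or.inr ⟨art.2, Or.inl rfl, hu, hv, hne⟩
        · exact Or.inr ⟨c, Or.inr hcm, hu, hv, hne⟩
      · rintro (hB | ⟨c, (rfl | hcm), hu, hv, hne⟩)
        · exact Or.inl (Or.inl hB)
        · exact Or.inl (Or.inr ⟨hu, hv, hne⟩)
        · exact Or.inr ⟨c, hcm, hu, hv, hne⟩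
    · intro u
      rw [List.foldl_cons, m2]
      simp only [List.map_cons, List.flatten_cons, List.mem_append]
      tauto

theorem graphA_char (artigos : List (String × List String)) :
    (∀ u v, v ∈ (erdosGraphA artigos).getD u []
        ↔ EdgeIn (PySem.Dict.ofList artigos).values u v) ∧
    (∀ u, (erdosGraphA artigos).contains u = true
        ↔ u ∈ (PySem.Dict.ofList artigos).values.flatten) := by
  have hrw : erdosGraphA artigos
      = (PySem.Dict.ofList artigos).items.foldl (fun g artigo => artigo.2.foldl (fun g pessoa =>
          g.insert pessoa (PySem.Set.discard
            (if g.contains pessoa = false then PySem.Set.ofList artigo.2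
             else PySem.Set.union (g.getD pessoa PySem.Set.empty) artigo.2) pessoa)) g)
        PySem.Dict.empty := by
    unfold erdosGraphA
    apply PySem.List.foldl_congr_mem
    intro acc art hart
    have hget : (PySem.Dict.ofList artigos).get? art.1 = some art.2 :=
      PySem.Dict.get?_of_mem_items _ hart (PySem.Dict.nodup_keys_ofList artigos)
    have : (PySem.Dict.ofList artigos).getD art.1 [] = art.2 :=
      PySem.Dict.getD_of_get?_eq_some _ [] hget
    rw [this]
  have hvals : (PySem.Dict.ofList artigos).items.map (·.2)
      = (PySem.Dict.ofList artigos).values := rfl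
  obtain ⟨m1, m2⟩ := gcOuter (PySem.Dict.ofList artigos).items PySem.Dict.empty
    (fun _ _ => False) (fun _ => False)
    (fun _ _ h => h) (fun _ _ h => h.elim)
    (by intro u v; rw [show PySem.Dict.empty.getD u ([] : PySem.Set String) = [] from rfl]; simp)
    (by intro u; simp [PySem.Dict.contains_empty])
  rw [hvals] at m1 m2
  constructor
  · intro u v; rw [hrw, m1]; tauto
  · intro u; rw [hrw, m2]; tauto

-- ---- proof-side level-synchronous reformulation of A's BFS ----

def bfsBInner (d : Int) (st : List String × PySem.Dict String Int) (adj : String) :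
    List String × PySem.Dict String Int :=
  if st.2.contains adj = false then (st.1 ++ [adj], st.2.insert adj (d + 1)) else st

def bfsBStep (grafo : PySem.Dict String (PySem.Set String)) (d : Int)
    (st : List String × PySem.Dict String Int) (v : String) :
    List String × PySem.Dict String Int :=
  (grafo.getD v []).foldl (bfsBInner d) st

theorem bfsBInner_shape (d : Int) : ∀ (adjs q : List String) (dist : PySem.Dict String Int),
    ∃ add : List String,
    (adjs.foldl (bfsBInner d) (q, dist)).1 = q ++ add ∧
    (adjs.foldl (bfsBInner d) (q, dist)).2.keys = dist.keys ++ add ∧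
    add.Nodup ∧ (∀ a ∈ add, a ∈ adjs ∧ a ∉ dist.keys) ∧
    (∀ x ∈ dist.keys, (adjs.foldl (bfsBInner d) (q, dist)).2.get? x = dist.get? x) ∧
    (∀ a ∈ add, (adjs.foldl (bfsBInner d) (q, dist)).2.get? a = some (d + 1)) := by
  intro adjs
  induction adjs with
  | nil => intro q dist; exact ⟨[], by simp⟩
  | cons adj rest ih =>
    intro q dist
    by_cases hc : dist.contains adj = false
    · have hmemk : adj ∉ dist.keys := fun hk => by
        rw [(PySem.Dict.contains_iff_mem_keys dist adj).mpr hk] at hc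
        simp at hc
      have hstep : bfsBInner d (q, dist) adj = (q ++ [adj], dist.insert adj (d + 1)) := by
        simp only [bfsBInner, hc, if_true]
      have hkeys : (dist.insert adj (d + 1)).keys = dist.keys ++ [adj] :=
        PySem.Dict.keys_insert_of_not_contains dist (d + 1) hc
      have hpres : ∀ x ∈ dist.keys, (dist.insert adj (d + 1)).get? x = dist.get? x := by
        intro x hx
        exact PySem.Dict.get?_insert_of_ne dist (d + 1) (fun h => hmemk (h ▸ hx))
      obtain ⟨add', h1, h2, hnd, hm, hp, hnew⟩ := ih (q ++ [adj]) (dist.insert adj (d + 1))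
      have hsub' : ∀ a ∈ add', a ∉ dist.keys ++ [adj] := fun a ha => by
        rw [← hkeys]; exact (hm a ha).2
      refine ⟨adj :: add', ?_, ?_, ?_, ?_, ?_, ?_⟩
      · simp only [List.foldl_cons, hstep, h1, List.append_assoc, List.singleton_append]
      · simp only [List.foldl_cons, hstep, h2, hkeys, List.append_assoc, List.singleton_append]
      · exact List.nodup_cons.mpr ⟨fun hx => by
          have := hsub' adj hx
          simp at this, hnd⟩
      · intro a ha
        rcases List.mem_cons.mp ha with rfl | ha
        · exact ⟨List.mem_cons_self, hmemk⟩
        · exact ⟨List.mem_cons_of_mem _ (hm a ha).1, fun hv => hsub' a ha (by simp [hv])⟩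
      · intro x hx
        simp only [List.foldl_cons, hstep]
        rw [hp x (by rw [hkeys]; exact List.mem_append_left _ hx)]
        exact hpres x hx
      · intro a ha
        simp only [List.foldl_cons, hstep]
        rcases List.mem_cons.mp ha with rfl | ha
        · rw [hp a (by rw [hkeys]; exact List.mem_append_right _ (by simp))]
          exact PySem.Dict.get?_insert_self dist a (d + 1)
        · exact hnew a ha
    · have hc' : dist.contains adj = true := by
        cases h : dist.contains adj
        · exact absurd h hc
        · rfl
      have hstep : bfsBInner d (q, dist) adj = (q, dist) := by
        simp only [bfsBInner, hc', Bool.true_eq_false, if_false]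
      obtain ⟨add', h1, h2, hnd, hm, hp, hnew⟩ := ih q dist
      refine ⟨add', ?_, ?_, hnd, ?_, ?_, ?_⟩
      · simp only [List.foldl_cons, hstep, h1]
      · simp only [List.foldl_cons, hstep, h2]
      · exact fun a ha => ⟨List.mem_cons_of_mem _ (hm a ha).1, (hm a ha).2⟩
      · intro x hx; simp only [List.foldl_cons, hstep]; exact hp x hx
      · intro a ha; simp only [List.foldl_cons, hstep]; exact hnew a ha

theorem bfsBStepFold_shape (grafo : PySem.Dict String (PySem.Set String)) (d : Int) :
    ∀ (fr q : List String) (dist : PySem.Dict String Int), ∃ add : List String,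
    (fr.foldl (bfsBStep grafo d) (q, dist)).1 = q ++ add ∧
    (fr.foldl (bfsBStep grafo d) (q, dist)).2.keys = dist.keys ++ add ∧
    add.Nodup ∧ (∀ a ∈ add, (∃ w ∈ fr, a ∈ grafo.getD w []) ∧ a ∉ dist.keys) ∧
    (∀ x ∈ dist.keys, (fr.foldl (bfsBStep grafo d) (q, dist)).2.get? x = dist.get? x) ∧
    (∀ a ∈ add, (fr.foldl (bfsBStep grafo d) (q, dist)).2.get? a = some (d + 1)) := by
  intro fr
  induction fr with
  | nil => intro q dist; exact ⟨[], by simp⟩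
  | cons v fr' ih =>
    intro q dist
    obtain ⟨add1, a1, a2, a3, a4, a5, a6⟩ := bfsBInner_shape d (grafo.getD v []) q dist
    have hstep : bfsBStep grafo d (q, dist) v
        = ((grafo.getD v []).foldl (bfsBInner d) (q, dist)) := rfl
    set st1 := (grafo.getD v []).foldl (bfsBInner d) (q, dist) with hst1
    obtain ⟨add2, b1, b2, b3, b4, b5, b6⟩ := ih st1.1 st1.2
    have hsub1 : ∀ a ∈ add1, a ∈ st1.2.keys := fun a ha => by
      rw [a2]; exact List.mem_append_right _ ha
    refine ⟨add1 ++ add2, ?_, ?_, ?_, ?_, ?_, ?_⟩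
    · simp only [List.foldl_cons, hstep, b1, a1, List.append_assoc]
    · simp only [List.foldl_cons, hstep, b2, a2, List.append_assoc]
    · refine List.Nodup.append a3 b3 (fun a ha1 ha2 => ?_)
      exact (b4 a ha2).2 (hsub1 a ha1)
    · intro a ha
      rcases List.mem_append.mp ha with ha | ha
      · exact ⟨⟨v, List.mem_cons_self, (a4 a ha).1⟩, (a4 a ha).2⟩
      · refine ⟨?_, fun hk => (b4 a ha).2 ?_⟩
        · obtain ⟨w, hw, hwm⟩ := (b4 a ha).1
          exact ⟨w, List.mem_cons_of_mem _ hw, hwm⟩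
        · rw [a2]; exact List.mem_append_left _ hk
    · intro x hx
      simp only [List.foldl_cons, hstep]
      rw [b5 x (by rw [a2]; exact List.mem_append_left _ hx)]
      exact a5 x hx
    · intro a ha
      simp only [List.foldl_cons, hstep]
      rcases List.mem_append.mp ha with ha | ha
      · rw [b5 a (hsub1 a ha)]; exact a6 a ha
      · exact b6 a ha

def erdosBfsB (grafo : PySem.Dict String (PySem.Set String)) :
    List String → PySem.Dict String Int → Int → PySem.Dict String Int
  | [], dist, _ => dist
  | v :: fr, dist, d =>
    erdosBfsB grafo ((v :: fr).foldl (bfsBStep grafo d) ([], dist)).1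
      ((v :: fr).foldl (bfsBStep grafo d) ([], dist)).2 (d + 1)
  termination_by fr dist _ =>
    2 * ((erdosUniv grafo) \ dist.keys.toFinset).card + (if fr.isEmpty then 0 else 1)
  decreasing_by
    obtain ⟨add, h1, h2, hnd, hmem, _, _⟩ := bfsBStepFold_shape grafo d (v :: fr) [] dist
    rw [h1, h2]
    have hdrop := card_drop (erdosUniv grafo) dist.keys add hnd
      (fun a ha => by
        simp only [erdosUniv, List.mem_toFinset]
        obtain ⟨w, _, hwm⟩ := (hmem a ha).1
        exact mem_flatten_of_mem_getD grafo w a hwm)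
      (fun a ha => (hmem a ha).2)
    rcases add with _ | ⟨a, add'⟩
    · simp only [List.append_nil] at hdrop
      simp only [List.append_nil, List.isEmpty_nil, List.isEmpty_cons,
        Bool.false_eq_true, if_false, if_true]
      omega
    · have hl : (a :: add').length ≥ 1 := by simp
      simp only [List.nil_append, List.isEmpty_cons, Bool.false_eq_true, if_false]
      omega

theorem step_align (v : String) (d : Int) :
    ∀ (adjs pre acc : List String) (dist : PySem.Dict String Int),
    dist.get? v = some d →
    adjs.foldl (bfsAStep v) (pre ++ acc, dist.keys, dist)
      = (pre ++ (adjs.foldl (bfsBInner d) (acc, dist)).1,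
         (adjs.foldl (bfsBInner d) (acc, dist)).2.keys,
         (adjs.foldl (bfsBInner d) (acc, dist)).2) := by
  intro adjs
  induction adjs with
  | nil => intro pre acc dist hv; rfl
  | cons adj rest ih =>
    intro pre acc dist hv
    have hvmem : v ∈ dist.keys := by
      by_contra h
      rw [(PySem.Dict.get?_eq_none_iff_not_mem_keys dist v).mpr h] at hv
      cases hv
    by_cases hc : dist.contains adj = false
    · have hmemk : adj ∉ dist.keys := fun hk => by
        rw [(PySem.Dict.contains_iff_mem_keys dist adj).mpr hk] at hc
        simp at hc
      have hne : v ≠ adj := fun h => hmemk (h ▸ hvmem)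
      have hsc : PySem.Set.contains dist.keys adj = false := by
        cases h : PySem.Set.contains dist.keys adj
        · rfl
        · exact absurd ((PySem.Set.contains_iff dist.keys adj).mp h) hmemk
      have hstepA : bfsAStep v (pre ++ acc, dist.keys, dist) adj
          = (pre ++ (acc ++ [adj]), dist.keys ++ [adj], dist.insert adj (d + 1)) := by
        simp only [bfsAStep, hsc, if_true, hv, Option.getD_some,
          PySem.Set.add_of_not_mem hmemk, List.append_assoc]
      have hstepB : bfsBInner d (acc, dist) adj = (acc ++ [adj], dist.insert adj (d + 1)) := by
        simp only [bfsBInner, hc, if_true]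
      have hkeys : (dist.insert adj (d + 1)).keys = dist.keys ++ [adj] :=
        PySem.Dict.keys_insert_of_not_contains dist (d + 1) hc
      have hv' : (dist.insert adj (d + 1)).get? v = some d := by
        rw [PySem.Dict.get?_insert_of_ne dist (d + 1) hne]
        exact hv
      simp only [List.foldl_cons, hstepA, hstepB]
      rw [← hkeys]
      exact ih pre (acc ++ [adj]) (dist.insert adj (d + 1)) hv'
    · have hc' : dist.contains adj = true := by
        cases h : dist.contains adj
        · exact absurd h hc
        · rfl
      have hmemk : adj ∈ dist.keys := (PySem.Dict.contains_iff_mem_keys dist adj).mp hc'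
      have hsc : PySem.Set.contains dist.keys adj = true :=
        (PySem.Set.contains_iff dist.keys adj).mpr hmemk
      have hstepA : bfsAStep v (pre ++ acc, dist.keys, dist) adj
          = (pre ++ acc, dist.keys, dist) := by
        simp [bfsAStep, hmemk]
      have hstepB : bfsBInner d (acc, dist) adj = (acc, dist) := by
        simp only [bfsBInner, hc', Bool.true_eq_false, if_false]
      simp only [List.foldl_cons, hstepA, hstepB]
      exact ih pre acc dist hv

theorem level_align (grafo : PySem.Dict String (PySem.Set String)) (d : Int) :
    ∀ (fr acc : List String) (dist : PySem.Dict String Int),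
    (∀ w ∈ fr, dist.get? w = some d) →
    erdosBfsA grafo (fr ++ acc) dist.keys dist
      = erdosBfsA grafo (fr.foldl (bfsBStep grafo d) (acc, dist)).1
          ((fr.foldl (bfsBStep grafo d) (acc, dist)).2).keys
          (fr.foldl (bfsBStep grafo d) (acc, dist)).2 := by
  intro fr
  induction fr with
  | nil => intro acc dist _; rfl
  | cons v fr' ih =>
    intro acc dist hfr
    have hv : dist.get? v = some d := hfr v List.mem_cons_self
    obtain ⟨add1, a1, a2, a3, a4, a5, a6⟩ := bfsBInner_shape d (grafo.getD v []) acc dist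
    have hcons : (v :: fr') ++ acc = v :: (fr' ++ acc) := rfl
    rw [hcons, erdosBfsA]
    rw [step_align v d (grafo.getD v []) fr' acc dist hv]
    have hbst : bfsBStep grafo d (acc, dist) v
        = (grafo.getD v []).foldl (bfsBInner d) (acc, dist) := rfl
    have hfold : (v :: fr').foldl (bfsBStep grafo d) (acc, dist)
        = fr'.foldl (bfsBStep grafo d) ((grafo.getD v []).foldl (bfsBInner d) (acc, dist)) := by
      rw [List.foldl_cons, hbst]
    rw [hfold]
    exact ih ((grafo.getD v []).foldl (bfsBInner d) (acc, dist)).1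
      ((grafo.getD v []).foldl (bfsBInner d) (acc, dist)).2
      (fun w hw => by
        rw [a5 w (by
          have := hfr w (List.mem_cons_of_mem _ hw)
          by_contra hnk
          rw [(PySem.Dict.get?_eq_none_iff_not_mem_keys dist w).mpr hnk] at this
          cases this)]
        exact hfr w (List.mem_cons_of_mem _ hw))

theorem bfs_main (grafo : PySem.Dict String (PySem.Set String)) :
    ∀ (N : ℕ) (fr : List String) (dist : PySem.Dict String Int) (d : Int),
    2 * ((erdosUniv grafo) \ dist.keys.toFinset).card + (if fr.isEmpty then 0 else 1) ≤ N →
    (∀ w ∈ fr, dist.get? w = some d) →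
    erdosBfsA grafo fr dist.keys dist = erdosBfsB grafo fr dist d := by
  intro N
  induction N with
  | zero =>
    intro fr dist d hN hfr
    cases fr with
    | nil => rw [erdosBfsA, erdosBfsB]
    | cons v fr' => simp at hN
  | succ N ihN =>
    intro fr dist d hN hfr
    cases fr with
    | nil => rw [erdosBfsA, erdosBfsB]
    | cons v fr' =>
      obtain ⟨add, b1, b2, b3, b4, b5, b6⟩ := bfsBStepFold_shape grafo d (v :: fr') [] dist
      have hla := level_align grafo d (v :: fr') [] dist hfr
      rw [List.append_nil] at hla
      rw [hla, erdosBfsB]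
      have hdrop := card_drop (erdosUniv grafo) dist.keys add b3
        (fun a ha => by
          simp only [erdosUniv, List.mem_toFinset]
          obtain ⟨w, _, hwm⟩ := (b4 a ha).1
          exact mem_flatten_of_mem_getD grafo w a hwm)
        (fun a ha => (b4 a ha).2)
      refine ihN ((v :: fr').foldl (bfsBStep grafo d) ([], dist)).1
        ((v :: fr').foldl (bfsBStep grafo d) ([], dist)).2 (d + 1) ?_ ?_
      · rw [b1, b2]
        simp only [List.isEmpty_cons, Bool.false_eq_true, if_false] at hN
        rcases add with _ | ⟨a, add'⟩
        · simp only [List.append_nil] at hdrop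
          simp only [List.append_nil, List.isEmpty_nil, if_true]
          omega
        · have hl : (a :: add').length ≥ 1 := by simp
          simp only [List.nil_append, List.isEmpty_cons, Bool.false_eq_true, if_false]
          omega
      · intro w hw
        rw [b1, List.nil_append] at hw
        exact b6 w hw

-- every neighbour of a frontier vertex is keyed after the level pass
theorem bfsBInner_covers (d : Int) : ∀ (adjs : List String) (st : List String × PySem.Dict String Int),
    ∀ a ∈ adjs, ((adjs.foldl (bfsBInner d) st).2).contains a = true := by
  intro adjs
  induction adjs with
  | nil => intro st a ha; cases ha
  | cons adj rest ih =>
    intro st a ha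
    have hmono : ∀ (st' : List String × PySem.Dict String Int) (x : String),
        st'.2.contains x = true → ((rest.foldl (bfsBInner d) st').2).contains x = true := by
      intro st' x hx
      obtain ⟨add, _, h2, _, _, _, _⟩ := bfsBInner_shape d rest st'.1 st'.2
      rw [PySem.Dict.contains_iff_mem_keys] at hx ⊢
      rw [h2]
      exact List.mem_append_left _ hx
    rcases List.mem_cons.mp ha with rfl | ha
    · rw [List.foldl_cons]
      apply hmono
      unfold bfsBInner
      by_cases hc : st.2.contains a = false
      · rw [if_pos hc]
        exact PySem.Dict.contains_insert_self st.2 a (d + 1)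
      · rw [if_neg hc]
        cases h : st.2.contains a
        · exact absurd h hc
        · rfl
    · rw [List.foldl_cons]
      exact ih _ a ha

theorem bfsBStepFold_covers (grafo : PySem.Dict String (PySem.Set String)) (d : Int) :
    ∀ (fr : List String) (st : List String × PySem.Dict String Int),
    ∀ v ∈ fr, ∀ adj ∈ grafo.getD v [],
    ((fr.foldl (bfsBStep grafo d) st).2).contains adj = true := by
  intro fr
  induction fr with
  | nil => intro st v hv; cases hv
  | cons v0 fr' ih =>
    intro st v hv adj hadj
    have hmono : ∀ (st' : List String × PySem.Dict String Int) (x : String),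
        st'.2.contains x = true → ((fr'.foldl (bfsBStep grafo d) st').2).contains x = true := by
      intro st' x hx
      obtain ⟨add, _, h2, _, _, _, _⟩ := bfsBStepFold_shape grafo d fr' st'.1 st'.2
      rw [PySem.Dict.contains_iff_mem_keys] at hx ⊢
      rw [h2]
      exact List.mem_append_left _ hx
    rcases List.mem_cons.mp hv with rfl | hv
    · rw [List.foldl_cons]
      apply hmono
      exact bfsBInner_covers d (grafo.getD v []) st adj hadj
    · rw [List.foldl_cons]
      exact ih _ v hv adj hadj

def LevelInv (grafo : PySem.Dict String (PySem.Set String)) (vals : List (List String))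
    (fr : List String) (dist : PySem.Dict String Int) (l : Nat) : Prop :=
  dist.get? "Paul Erdos" = some 0 ∧
  (∀ p x, dist.get? p = some x → ∃ k : Nat, k ≤ l ∧ x = (k : Int) ∧ Reach vals k p) ∧
  (∀ p, dist.get? p = some ((l : Nat) : Int) ↔ p ∈ fr) ∧
  (∀ p (k : Nat), dist.get? p = some (k : Int) → k < l → ∀ v ∈ grafo.getD p [],
    ∃ k' : Nat, k' ≤ k + 1 ∧ dist.get? v = some (k' : Int)) ∧
  dist.keys.Nodup

theorem levelInv_nil_good (grafo : PySem.Dict String (PySem.Set String))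
    (vals : List (List String))
    (hedge : ∀ u v, v ∈ grafo.getD u [] ↔ EdgeIn vals u v)
    (dist : PySem.Dict String Int) (l : Nat)
    (hinv : LevelInv grafo vals [] dist l) : GoodDist vals dist ∧ dist.keys.Nodup := by
  obtain ⟨h1, h2, h3, h4, h5⟩ := hinv
  refine ⟨⟨h1, fun p x hg => ?_, fun p k hg w hE => ?_⟩, h5⟩
  · obtain ⟨k, _, hx, hr⟩ := h2 p x hg
    exact ⟨k, hx, hr⟩
  · have hne : k ≠ l := by
      intro h
      rw [h] at hg
      exact absurd ((h3 p).mp hg) (List.not_mem_nil)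
    have hkl : k < l := by
      obtain ⟨k0, hk0l, hx0, _⟩ := h2 p _ hg
      have : k0 = k := by exact_mod_cast hx0.symm
      omega
    exact h4 p k hg hkl w ((hedge p w).mpr hE)

theorem levelInv_pres (grafo : PySem.Dict String (PySem.Set String))
    (vals : List (List String))
    (hedge : ∀ u v, v ∈ grafo.getD u [] ↔ EdgeIn vals u v)
    (v : String) (fr' : List String) (dist : PySem.Dict String Int) (l : Nat)
    (hinv : LevelInv grafo vals (v :: fr') dist l) :
    LevelInv grafo vals ((v :: fr').foldl (bfsBStep grafo (l : Int)) ([], dist)).1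
      ((v :: fr').foldl (bfsBStep grafo (l : Int)) ([], dist)).2 (l + 1) := by
  obtain ⟨h1, h2, h3, h4, h5⟩ := hinv
  obtain ⟨add, b1, b2, b3, b4, b5, b6⟩ := bfsBStepFold_shape grafo (l : Int) (v :: fr') [] dist
  set st := (v :: fr').foldl (bfsBStep grafo (l : Int)) ([], dist) with hst
  rw [List.nil_append] at b1
  have hmemkeys : ∀ p (x : Int), dist.get? p = some x → p ∈ dist.keys := fun p x hg => by
    by_contra h
    rw [(PySem.Dict.get?_eq_none_iff_not_mem_keys dist p).mpr h] at hg
    cases hg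
  have hkeyclass : ∀ p x, st.2.get? p = some x →
      (dist.get? p = some x) ∨ (p ∈ add ∧ x = (l : Int) + 1) := by
    intro p x hg
    have hp : p ∈ st.2.keys := by
      by_contra h
      rw [(PySem.Dict.get?_eq_none_iff_not_mem_keys st.2 p).mpr h] at hg
      cases hg
    rw [b2] at hp
    rcases List.mem_append.mp hp with hp | hp
    · left; rw [← b5 p hp]; exact hg
    · right
      refine ⟨hp, ?_⟩
      rw [b6 p hp] at hg
      exact (Option.some.inj hg).symm
  have hcast : ((l : Int) + 1) = ((l + 1 : Nat) : Int) := by push_cast; ring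
  refine ⟨?_, ?_, ?_, ?_, ?_⟩
  · rw [b5 _ (hmemkeys _ _ h1)]; exact h1
  · intro p x hg
    rcases hkeyclass p x hg with hold | ⟨hadd, rfl⟩
    · obtain ⟨k, hkl, hx, hr⟩ := h2 p x hold
      exact ⟨k, by omega, hx, hr⟩
    · refine ⟨l + 1, le_refl _, hcast, ?_⟩
      obtain ⟨⟨w, hw, hwm⟩, _⟩ := b4 p hadd
      have hwv : dist.get? w = some ((l : Nat) : Int) := (h3 w).mpr hw
      obtain ⟨kw, hkwl, hkwx, hrw⟩ := h2 w _ hwv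
      have hkwl' : kw = l := by exact_mod_cast hkwx.symm
      obtain ⟨conj, hcj, hwc, hpc, hne⟩ := (hedge w p).mp hwm
      exact Reach.step (hkwl' ▸ hrw) hcj hwc hpc hne
  · intro p
    rw [b1]
    constructor
    · intro hg
      rw [← hcast] at hg
      rcases hkeyclass p _ hg with hold | ⟨hadd, _⟩
      · obtain ⟨k, hkl, hx, _⟩ := h2 p _ hold
        have : k = l + 1 := by exact_mod_cast hx.symm
        omega
      · exact hadd
    · intro hp
      rw [b6 p hp, hcast]
  · intro p k hg hkl1 w hw
    rcases hkeyclass p _ hg with hold | ⟨hadd, hx⟩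
    · rcases Nat.lt_or_ge k l with hkl | hge
      · obtain ⟨k', hk', hg'⟩ := h4 p k hold hkl w hw
        exact ⟨k', by omega, by rw [b5 _ (hmemkeys _ _ hg')]; exact hg'⟩
      · have hkeq : k = l := by
          obtain ⟨k0, hk0l, hx0, _⟩ := h2 p _ hold
          have : k0 = k := by exact_mod_cast hx0.symm
          omega
        have hpfr : p ∈ v :: fr' := (h3 p).mp (by rw [← hkeq]; exact hold)
        have hcov : (st.2.get? w).isSome = true := by
          rw [← PySem.Dict.contains_eq_isSome_get?, hst]
          exact bfsBStepFold_covers grafo (l : Int) (v :: fr') ([], dist) p hpfr w hw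
        cases hgw : st.2.get? w with
        | none => rw [hgw] at hcov; cases hcov
        | some y =>
          rcases hkeyclass w y hgw with holdw | ⟨_, rfl⟩
          · obtain ⟨k', hk'l, hx', _⟩ := h2 w y holdw
            exact ⟨k', by omega, by rw [hx']⟩
          · exact ⟨k + 1, le_refl _, by rw [hkeq, hcast]⟩
    · have : k = l + 1 := by
        rw [hcast] at hx
        exact_mod_cast hx
      omega
  · rw [b2]
    exact List.Nodup.append h5 b3 (fun a ha1 ha2 => (b4 a ha2).2 ha1)

theorem levelInv_final (grafo : PySem.Dict String (PySem.Set String))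
    (vals : List (List String))
    (hedge : ∀ u v, v ∈ grafo.getD u [] ↔ EdgeIn vals u v) :
    ∀ (N : ℕ) (fr : List String) (dist : PySem.Dict String Int) (l : Nat),
    2 * ((erdosUniv grafo) \ dist.keys.toFinset).card + (if fr.isEmpty then 0 else 1) ≤ N →
    LevelInv grafo vals fr dist l →
    GoodDist vals (erdosBfsB grafo fr dist (l : Int)) ∧
      (erdosBfsB grafo fr dist (l : Int)).keys.Nodup := by
  intro N
  induction N with
  | zero =>
    intro fr dist l hN hinv
    cases fr with
    | nil =>
      rw [erdosBfsB]
      exact levelInv_nil_good grafo vals hedge dist l hinv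
    | cons v fr' => simp at hN
  | succ N ihN =>
    intro fr dist l hN hinv
    cases fr with
    | nil =>
      rw [erdosBfsB]
      exact levelInv_nil_good grafo vals hedge dist l hinv
    | cons v fr' =>
      obtain ⟨add, b1, b2, b3, b4, _, _⟩ := bfsBStepFold_shape grafo (l : Int) (v :: fr') [] dist
      have hpres := levelInv_pres grafo vals hedge v fr' dist l hinv
      have hdrop := card_drop (erdosUniv grafo) dist.keys add b3
        (fun a ha => by
          simp only [erdosUniv, List.mem_toFinset]
          obtain ⟨w, _, hwm⟩ := (b4 a ha).1
          exact mem_flatten_of_mem_getD grafo w a hwm)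
        (fun a ha => (b4 a ha).2)
      rw [erdosBfsB]
      have hcast : ((l : Int) + 1) = ((l + 1 : Nat) : Int) := by push_cast; ring
      rw [hcast]
      refine ihN _ _ (l + 1) ?_ hpres
      rw [b1, b2]
      simp only [List.isEmpty_cons, Bool.false_eq_true, if_false] at hN
      rcases add with _ | ⟨a, add'⟩
      · simp only [List.append_nil] at hdrop
        simp only [List.append_nil, List.isEmpty_nil, if_true]
        omega
      · have hl : (a :: add').length ≥ 1 := by simp
        simp only [List.nil_append, List.isEmpty_cons, Bool.false_eq_true, if_false]
        omega

theorem distA_good (artigos : List (String × List String))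
    (hg : (erdosGraphA artigos).contains "Paul Erdos" = true) :
    GoodDist (PySem.Dict.ofList artigos).values (erdosDistA (erdosGraphA artigos)) ∧
      (erdosDistA (erdosGraphA artigos)).keys.Nodup := by
  have hedge := (graphA_char artigos).1
  unfold erdosDistA
  rw [if_pos hg]
  have h0 : PySem.Set.ofList ["Paul Erdos"]
      = (PySem.Dict.empty.insert "Paul Erdos" (0 : Int)).keys := by decide
  rw [h0]
  have hbm := bfs_main (erdosGraphA artigos)
    (2 * ((erdosUniv (erdosGraphA artigos)) \
      (PySem.Dict.empty.insert "Paul Erdos" (0 : Int)).keys.toFinset).card + 1)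
    ["Paul Erdos"] (PySem.Dict.empty.insert "Paul Erdos" (0 : Int)) 0 (by simp)
    (fun w hw => by
      have hweq : w = "Paul Erdos" := by simpa using hw
      rw [hweq]
      exact PySem.Dict.get?_insert_self PySem.Dict.empty "Paul Erdos" 0)
  rw [hbm]
  have hget : ∀ p, (PySem.Dict.empty.insert "Paul Erdos" (0 : Int)).get? p
      = if p = "Paul Erdos" then some 0 else none := by
    intro p
    by_cases hp : p = "Paul Erdos"
    · rw [hp]
      exact PySem.Dict.get?_insert_self PySem.Dict.empty "Paul Erdos" 0
    · rw [PySem.Dict.get?_insert_of_ne PySem.Dict.empty 0 hp, if_neg hp]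
      rfl
  have hinv : LevelInv (erdosGraphA artigos) (PySem.Dict.ofList artigos).values
      ["Paul Erdos"] (PySem.Dict.empty.insert "Paul Erdos" (0 : Int)) 0 := by
    refine ⟨?_, ?_, ?_, ?_, ?_⟩
    · exact PySem.Dict.get?_insert_self PySem.Dict.empty "Paul Erdos" 0
    · intro p x hgp
      rw [hget p] at hgp
      by_cases hp : p = "Paul Erdos"
      · rw [if_pos hp] at hgp
        exact ⟨0, le_refl _, (Option.some.inj hgp).symm, hp ▸ Reach.base⟩
      · rw [if_neg hp] at hgp; cases hgp
    · intro p
      rw [hget p]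
      by_cases hp : p = "Paul Erdos"
      · simp [hp]
      · simp [hp]
    · intro p k hgp hk; omega
    · rw [PySem.Dict.keys_insert_of_not_contains PySem.Dict.empty 0 rfl]
      simp [PySem.Dict.keys_empty]
  have := levelInv_final (erdosGraphA artigos) (PySem.Dict.ofList artigos).values hedge
    (2 * ((erdosUniv (erdosGraphA artigos)) \
      (PySem.Dict.empty.insert "Paul Erdos" (0 : Int)).keys.toFinset).card + 1)
    ["Paul Erdos"] (PySem.Dict.empty.insert "Paul Erdos" (0 : Int)) 0 (by simp) hinv
  exact_mod_cast this

-- ---- B-side: relaxation facts ----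

def DictLe (d1 d2 : PySem.Dict String Int) : Prop :=
  ∀ q y, d1.get? q = some y → ∃ y' ≤ y, d2.get? q = some y'

theorem dictLe_refl (d : PySem.Dict String Int) : DictLe d d :=
  fun _ y h => ⟨y, le_refl y, h⟩

theorem dictLe_trans {d1 d2 d3 : PySem.Dict String Int} (h12 : DictLe d1 d2)
    (h23 : DictLe d2 d3) : DictLe d1 d3 := by
  intro q y h
  obtain ⟨y', hy', h2⟩ := h12 q y h
  obtain ⟨y'', hy'', h3⟩ := h23 q y' h2
  exact ⟨y'', le_trans hy'' hy', h3⟩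

theorem relaxPerson_le (m : Int) (d : PySem.Dict String Int) (p : String) :
    DictLe d (relaxPerson m d p) := by
  intro q y hq
  unfold relaxPerson
  by_cases hcond : (d.contains p = false ∨ m < d.getD p 0)
  · rw [if_pos hcond]
    by_cases hqp : q = p
    · have hcont : d.contains p = true := by
        rw [PySem.Dict.contains_eq_isSome_get?, ← hqp, hq]; rfl
      have hgd : d.getD p 0 = y := by
        rw [PySem.Dict.getD_eq_get?_getD, ← hqp, hq]; rfl
      have hlt : m < y := by
        rcases hcond with hcond | hcond
        · rw [hcont] at hcond; cases hcond
        · rw [hgd] at hcond; exact hcond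
      exact ⟨m, le_of_lt hlt, by rw [hqp]; exact PySem.Dict.get?_insert_self d p m⟩
    · exact ⟨y, le_refl y, by rw [PySem.Dict.get?_insert_of_ne d m hqp]; exact hq⟩
  · rw [if_neg hcond]
    exact ⟨y, le_refl y, hq⟩

theorem foldl_relaxPerson_le (m : Int) :
    ∀ (l : List String) (d : PySem.Dict String Int), DictLe d (l.foldl (relaxPerson m) d) := by
  intro l
  induction l with
  | nil => intro d; exact dictLe_refl d
  | cons p rest ih =>
    intro d
    rw [List.foldl_cons]
    exact dictLe_trans (relaxPerson_le m d p) (ih (relaxPerson m d p))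

theorem relaxConj_le (d : PySem.Dict String Int) (conj : List String) :
    DictLe d (relaxConj d conj) := by
  unfold relaxConj
  cases PySem.List.min? ((conj.filter (fun p => d.contains p)).map (fun p => d.getD p 0))
      (fun x => x) with
  | none => exact dictLe_refl d
  | some mn => exact foldl_relaxPerson_le (mn + 1) conj d

theorem foldl_relaxConj_le :
    ∀ (l : List (List String)) (d : PySem.Dict String Int), DictLe d (l.foldl relaxConj d) := by
  intro l
  induction l with
  | nil => intro d; exact dictLe_refl d
  | cons c rest ih =>
    intro d
    rw [List.foldl_cons]
    exact dictLe_trans (relaxConj_le d c) (ih (relaxConj d c))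

theorem rounds_succ (vals : List (List String)) :
    ∀ (k : Nat) (d : PySem.Dict String Int),
    erdosRoundsB vals (k + 1) d = vals.foldl relaxConj (erdosRoundsB vals k d) := by
  intro k
  induction k with
  | zero => intro d; rfl
  | succ k ih =>
    intro d
    rw [erdosRoundsB, ih (vals.foldl relaxConj d), erdosRoundsB]

-- the value/provenance class through one article's inner relaxation loop
theorem relaxFold_class (m : Int) (conj : List String) (q : String) (mn : Int)
    (hmnm : mn < m) (dist0 : PySem.Dict String Int) :
    ∀ (l : List String) (d : PySem.Dict String Int),
    (∀ x ∈ l, x ∈ conj) →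
    (∀ p x, d.get? p = some x → dist0.get? p = some x ∨ (x = m ∧ p ∈ conj)) →
    d.get? q = some mn →
    d.keys.Nodup →
    (∀ p x, (l.foldl (relaxPerson m) d).get? p = some x →
      dist0.get? p = some x ∨ (x = m ∧ p ∈ conj)) ∧
    (l.foldl (relaxPerson m) d).get? q = some mn ∧
    (l.foldl (relaxPerson m) d).keys.Nodup := by
  intro l
  induction l with
  | nil => intro d _ hcl hq hnd; exact ⟨hcl, hq, hnd⟩
  | cons p0 rest ih =>
    intro d hl hcl hq hnd
    rw [List.foldl_cons]
    by_cases hcond : (d.contains p0 = false ∨ m < d.getD p0 0)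
    · have hne : p0 ≠ q := by
        intro hpq
        rw [hpq] at hcond
        have hcont : d.contains q = true := by
          rw [PySem.Dict.contains_eq_isSome_get?, hq]; rfl
        have hgd : d.getD q 0 = mn := by
          rw [PySem.Dict.getD_eq_get?_getD, hq]; rfl
        rcases hcond with hcond | hcond
        · rw [hcont] at hcond; cases hcond
        · rw [hgd] at hcond; omega
      have hstep : relaxPerson m d p0 = d.insert p0 m := by
        unfold relaxPerson; rw [if_pos hcond]
      rw [hstep]
      refine ih (d.insert p0 m) (fun x hx => hl x (List.mem_cons_of_mem _ hx)) ?_ ?_ ?_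
      · intro p x hp
        by_cases hpp : p = p0
        · rw [hpp, PySem.Dict.get?_insert_self d p0 m] at hp
          exact Or.inr ⟨(Option.some.inj hp).symm, by rw [hpp]; exact hl p0 List.mem_cons_self⟩
        · rw [PySem.Dict.get?_insert_of_ne d m hpp] at hp
          exact hcl p x hp
      · rw [PySem.Dict.get?_insert_of_ne d m (Ne.symm hne)]
        exact hq
      · exact PySem.Dict.nodup_keys_insert d p0 m hnd
    · have hstep : relaxPerson m d p0 = d := by
        unfold relaxPerson; rw [if_neg hcond]
      rw [hstep]
      exact ih d (fun x hx => hl x (List.mem_cons_of_mem _ hx)) hcl hq hnd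

theorem relaxConj_eq_none (d : PySem.Dict String Int) (conj : List String)
    (hmin : PySem.List.min? ((conj.filter (fun p => d.contains p)).map (fun p => d.getD p 0))
      (fun x => x) = none) : relaxConj d conj = d := by
  unfold relaxConj
  rw [hmin]

theorem relaxConj_eq_some (d : PySem.Dict String Int) (conj : List String) (mn : Int)
    (hmin : PySem.List.min? ((conj.filter (fun p => d.contains p)).map (fun p => d.getD p 0))
      (fun x => x) = some mn) : relaxConj d conj = conj.foldl (relaxPerson (mn + 1)) d := by
  unfold relaxConj
  rw [hmin]

def RelaxInv (vals : List (List String)) (dist : PySem.Dict String Int) : Prop :=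
  dist.get? "Paul Erdos" = some 0 ∧
  (∀ p x, dist.get? p = some x → ∃ k : Nat, x = (k : Int) ∧ Reach vals k p) ∧
  dist.keys.Nodup

theorem relaxConj_inv (vals : List (List String)) (conj : List String) (hconj : conj ∈ vals)
    (dist : PySem.Dict String Int) (h : RelaxInv vals dist) :
    RelaxInv vals (relaxConj dist conj) := by
  cases hmin : PySem.List.min? ((conj.filter (fun p => dist.contains p)).map
      (fun p => dist.getD p 0)) (fun x => x) with
  | none => rw [relaxConj_eq_none dist conj hmin]; exact h
  | some mn =>
    rw [relaxConj_eq_some dist conj mn hmin]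
    have hmem := PySem.List.min?_mem hmin
    obtain ⟨q, hqf, hqv⟩ := List.mem_map.mp hmem
    have hqc : q ∈ conj := List.mem_of_mem_filter hqf
    have hqcont : dist.contains q = true := by simpa using List.of_mem_filter hqf
    have hq : dist.get? q = some mn := by
      rw [PySem.Dict.contains_eq_isSome_get?] at hqcont
      cases hg : dist.get? q with
      | none => rw [hg] at hqcont; cases hqcont
      | some y =>
        rw [PySem.Dict.getD_eq_get?_getD, hg] at hqv
        simp only [Option.getD_some] at hqv
        rw [hqv]
    obtain ⟨kq, hkq, hrq⟩ := h.2.1 q mn hq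
    have hmn0 : (0 : Int) ≤ mn := by rw [hkq]; exact_mod_cast Nat.zero_le kq
    obtain ⟨hcl, hqfin, hndfin⟩ := relaxFold_class (mn + 1) conj q mn (by omega) dist conj dist
      (fun x hx => hx) (fun p x hp => Or.inl hp) hq h.2.2
    refine ⟨?_, ?_, hndfin⟩
    · obtain ⟨y, hy, hgy⟩ := foldl_relaxPerson_le (mn + 1) conj dist "Paul Erdos" 0 h.1
      rcases hcl _ _ hgy with hold | ⟨hym, _⟩
      · rw [h.1] at hold
        have : (0 : Int) = y := Option.some.inj hold
        rw [← this] at hgy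
        exact hgy
      · omega
    · intro p x hp
      rcases hcl p x hp with hold | ⟨hxm, hpc⟩
      · exact h.2.1 p x hold
      · have hpq : p ≠ q := by
          intro hpq
          rw [hpq, hqfin] at hp
          have := Option.some.inj hp
          omega
        refine ⟨kq + 1, ?_, Reach.step hrq hconj hqc hpc hpq⟩
        rw [hxm, hkq]
        push_cast
        ring

theorem foldl_relaxConj_inv (vals : List (List String)) :
    ∀ (l : List (List String)), (∀ c ∈ l, c ∈ vals) →
    ∀ d, RelaxInv vals d → RelaxInv vals (l.foldl relaxConj d) := by
  intro l
  induction l with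
  | nil => intro _ d h; exact h
  | cons c rest ih =>
    intro hsub d h
    rw [List.foldl_cons]
    exact ih (fun x hx => hsub x (List.mem_cons_of_mem _ hx)) (relaxConj d c)
      (relaxConj_inv vals c (hsub c List.mem_cons_self) d h)

theorem rounds_inv (vals : List (List String)) :
    ∀ (k : Nat) (d : PySem.Dict String Int), RelaxInv vals d →
    RelaxInv vals (erdosRoundsB vals k d) := by
  intro k
  induction k with
  | zero => intro d h; exact h
  | succ k ih =>
    intro d h
    rw [erdosRoundsB]
    exact ih (vals.foldl relaxConj d) (foldl_relaxConj_inv vals vals (fun _ hx => hx) d h)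

theorem relaxFold_upper (m : Int) :
    ∀ (l : List String) (d : PySem.Dict String Int),
    ∀ p ∈ l, ∃ y ≤ m, (l.foldl (relaxPerson m) d).get? p = some y := by
  intro l
  induction l with
  | nil => intro d p hp; cases hp
  | cons p0 rest ih =>
    intro d p hp
    rw [List.foldl_cons]
    rcases List.mem_cons.mp hp with rfl | hp
    · have hstep : ∃ y ≤ m, (relaxPerson m d p).get? p = some y := by
        unfold relaxPerson
        by_cases hcond : (d.contains p = false ∨ m < d.getD p 0)
        · rw [if_pos hcond]
          exact ⟨m, le_refl m, PySem.Dict.get?_insert_self d p m⟩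
        · rw [if_neg hcond]
          obtain ⟨hcont, hle⟩ := not_or.mp hcond
          rw [not_lt] at hle
          have hcont' : d.contains p = true := by
            cases h : d.contains p
            · exact absurd h hcont
            · rfl
          rw [PySem.Dict.contains_eq_isSome_get?] at hcont'
          cases hg : d.get? p with
          | none => rw [hg] at hcont'; cases hcont'
          | some y =>
            have : d.getD p 0 = y := by rw [PySem.Dict.getD_eq_get?_getD, hg]; rfl
            rw [this] at hle
            exact ⟨y, hle, rfl⟩
      obtain ⟨y, hy, hgy⟩ := hstep
      obtain ⟨y', hy', hgy'⟩ := foldl_relaxPerson_le m rest (relaxPerson m d p) p y hgy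
      exact ⟨y', le_trans hy' hy, hgy'⟩
    · exact ih (relaxPerson m d p0) p hp

theorem relaxConj_bound (dist : PySem.Dict String Int) (conj : List String) (u : String)
    (xu : Int) (hu : dist.get? u = some xu) (huc : u ∈ conj) :
    ∀ p ∈ conj, ∃ y ≤ xu + 1, (relaxConj dist conj).get? p = some y := by
  have hucont : dist.contains u = true := by
    rw [PySem.Dict.contains_eq_isSome_get?, hu]; rfl
  have humem : dist.getD u 0 ∈ (conj.filter (fun p => dist.contains p)).map
      (fun p => dist.getD p 0) :=
    List.mem_map.mpr ⟨u, List.mem_filter.mpr ⟨huc, by simp [hucont]⟩, rfl⟩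
  cases hmin : PySem.List.min? ((conj.filter (fun p => dist.contains p)).map
      (fun p => dist.getD p 0)) (fun x => x) with
  | none =>
    rw [(PySem.List.min?_eq_none_iff _ _).mp hmin] at humem
    cases humem
  | some mn =>
    rw [relaxConj_eq_some dist conj mn hmin]
    have hmnle : mn ≤ dist.getD u 0 := PySem.List.min?_isMin hmin _ humem
    have hgd : dist.getD u 0 = xu := by rw [PySem.Dict.getD_eq_get?_getD, hu]; rfl
    intro p hp
    obtain ⟨y, hy, hgy⟩ := relaxFold_upper (mn + 1) conj dist p hp
    exact ⟨y, by omega, hgy⟩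

theorem pass_bound (vals : List (List String)) (dist : PySem.Dict String Int)
    (u p : String) (conj : List String) (xu : Int)
    (hconj : conj ∈ vals) (hu : dist.get? u = some xu) (huc : u ∈ conj) (hpc : p ∈ conj) :
    ∃ y ≤ xu + 1, (vals.foldl relaxConj dist).get? p = some y := by
  obtain ⟨l1, l2, rfl⟩ := List.append_of_mem hconj
  rw [List.foldl_append, List.foldl_cons]
  obtain ⟨xu', hxu', hgu'⟩ := foldl_relaxConj_le l1 dist u xu hu
  obtain ⟨y, hy, hgy⟩ := relaxConj_bound _ conj u xu' hgu' huc p hpc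
  obtain ⟨y2, hy2, hgy2⟩ := foldl_relaxConj_le l2 _ p y hgy
  exact ⟨y2, by omega, hgy2⟩

theorem upper (vals : List (List String)) :
    ∀ (r : Nat) (k : Nat) (p : String), Reach vals k p → k ≤ r →
    ∃ y ≤ (k : Int),
      (erdosRoundsB vals r (PySem.Dict.empty.insert "Paul Erdos" 0)).get? p = some y := by
  intro r
  induction r with
  | zero =>
    intro k p hr hk
    have hk0 : k = 0 := Nat.le_zero.mp hk
    rw [hk0] at hr
    have hp := reach_zero hr
    refine ⟨0, by simp [hk0], ?_⟩
    rw [hp]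
    exact PySem.Dict.get?_insert_self PySem.Dict.empty "Paul Erdos" 0
  | succ r ih =>
    intro k p hr hk
    rw [rounds_succ]
    by_cases hkr : k ≤ r
    · obtain ⟨y, hy, hgy⟩ := ih k p hr hkr
      obtain ⟨y', hy', hgy'⟩ := foldl_relaxConj_le vals _ p y hgy
      exact ⟨y', le_trans hy' hy, hgy'⟩
    · cases hr with
      | base => omega
      | @mono d _ hd =>
        obtain ⟨y, hy, hgy⟩ := ih d p hd (by omega)
        obtain ⟨y', hy', hgy'⟩ := foldl_relaxConj_le vals _ p y hgy
        refine ⟨y', ?_, hgy'⟩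
        have : (d : Int) ≤ ((d + 1 : Nat) : Int) := by push_cast; omega
        omega
      | @step d u _ conj hd hconj huc hpc hne =>
        obtain ⟨xu, hxu, hgu⟩ := ih d u hd (by omega)
        obtain ⟨y, hy, hgy⟩ := pass_bound vals _ u p conj xu hconj hgu huc hpc
        refine ⟨y, ?_, hgy⟩
        have : ((d + 1 : Nat) : Int) = (d : Int) + 1 := by push_cast; ring
        omega

theorem exists_minreach {vals : List (List String)} {k : Nat} {p : String}
    (h : Reach vals k p) :
    ∃ j, (Reach vals j p ∧ ∀ i < j, ¬ Reach vals i p) ∧ j ≤ k := by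
  classical
  have hP : ∃ j, Reach vals j p := ⟨k, h⟩
  exact ⟨Nat.find hP, ⟨Nat.find_spec hP, fun i hi => Nat.find_min hP hi⟩, Nat.find_le h⟩

theorem minreach_succ {vals : List (List String)} {k : Nat} {p : String}
    (h : Reach vals (k + 1) p) (hmin : ∀ i < k + 1, ¬ Reach vals i p) :
    ∃ u conj, Reach vals k u ∧ (∀ i < k, ¬ Reach vals i u) ∧ conj ∈ vals ∧ u ∈ conj ∧
      p ∈ conj ∧ p ≠ u := by
  cases h with
  | mono hd => exact absurd hd (hmin k (Nat.lt_succ_self k))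
  | @step d u _ conj hd hconj huc hpc hne =>
    obtain ⟨j, ⟨hjr, hjmin⟩, hjk⟩ := exists_minreach hd
    have hjeq : j = k := by
      by_contra hne'
      have hjlt : j < k := lt_of_le_of_ne hjk hne'
      exact hmin (j + 1) (by omega) (Reach.step hjr hconj huc hpc hne)
    exact ⟨u, conj, hd, hjeq ▸ hjmin, hconj, huc, hpc, hne⟩

theorem chain (vals : List (List String)) (hguard : "Paul Erdos" ∈ vals.flatten) :
    ∀ (k : Nat) (p : String), Reach vals k p → (∀ i < k, ¬ Reach vals i p) →
    ∃ l : List String, l.Nodup ∧ l.length = k + 1 ∧ (∀ q ∈ l, q ∈ vals.flatten) ∧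
      (∀ q ∈ l, ∃ j ≤ k, Reach vals j q ∧ ∀ i < j, ¬ Reach vals i q) := by
  intro k
  induction k with
  | zero =>
    intro p h hmin
    have hp := reach_zero h
    refine ⟨[p], List.nodup_singleton p, rfl, ?_, ?_⟩
    · intro q hq
      rw [List.mem_singleton.mp hq, hp]
      exact hguard
    · intro q hq
      rw [List.mem_singleton.mp hq]
      exact ⟨0, le_refl 0, h, fun i hi => by omega⟩
  | succ k ih =>
    intro p h hmin
    obtain ⟨u, conj, hu, humin, hconj, huc, hpc, hne⟩ := minreach_succ h hmin
    obtain ⟨l, hnd, hlen, hflat, hmins⟩ := ih u hu humin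
    have hpnotin : p ∉ l := by
      intro hp
      obtain ⟨j, hj, hjr, _⟩ := hmins p hp
      exact hmin j (by omega) hjr
    refine ⟨p :: l, List.nodup_cons.mpr ⟨hpnotin, hnd⟩, by simp [hlen], ?_, ?_⟩
    · intro q hq
      rcases List.mem_cons.mp hq with rfl | hq
      · exact List.mem_flatten.mpr ⟨conj, hconj, hpc⟩
      · exact hflat q hq
    · intro q hq
      rcases List.mem_cons.mp hq with rfl | hq
      · exact ⟨k + 1, le_refl _, h, hmin⟩
      · obtain ⟨j, hj, hjr, hjm⟩ := hmins q hq
        exact ⟨j, by omega, hjr, hjm⟩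

theorem minreach_bound (vals : List (List String)) (hguard : "Paul Erdos" ∈ vals.flatten)
    {k : Nat} {p : String} (h : Reach vals k p) (hmin : ∀ i < k, ¬ Reach vals i p) :
    k + 1 ≤ (PySem.Set.ofList vals.flatten).length := by
  obtain ⟨l, hnd, hlen, hflat, _⟩ := chain vals hguard k p h hmin
  have h1 : l.toFinset.card = k + 1 := by rw [List.toFinset_card_of_nodup hnd, hlen]
  have hsub : l.toFinset ⊆ (vals.flatten).toFinset := fun x hx =>
    List.mem_toFinset.mpr (hflat x (List.mem_toFinset.mp hx))
  have h2 : (PySem.Set.ofList vals.flatten).toFinset = (vals.flatten).toFinset := by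
    ext x
    simp only [List.mem_toFinset]
    exact PySem.Set.mem_ofList _ _
  have h3 : (PySem.Set.ofList vals.flatten).length = (vals.flatten).toFinset.card := by
    rw [← h2, List.toFinset_card_of_nodup (PySem.Set.nodup_ofList _)]
  rw [h3, ← h1]
  exact Finset.card_le_card hsub

theorem distB_good (vals : List (List String)) (hguard : "Paul Erdos" ∈ vals.flatten) :
    GoodDist vals (erdosDistB vals) ∧ (erdosDistB vals).keys.Nodup := by
  have hany : vals.any (fun conj => conj.contains "Paul Erdos") = true := by
    obtain ⟨conj, hcj, hE⟩ := List.mem_flatten.mp hguard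
    exact List.any_eq_true.mpr ⟨conj, hcj, List.contains_iff_mem.mpr hE⟩
  unfold erdosDistB
  rw [if_pos hany]
  have hget : ∀ p, (PySem.Dict.empty.insert "Paul Erdos" (0 : Int)).get? p
      = if p = "Paul Erdos" then some 0 else none := by
    intro p
    by_cases hp : p = "Paul Erdos"
    · rw [hp]
      exact PySem.Dict.get?_insert_self PySem.Dict.empty "Paul Erdos" 0
    · rw [PySem.Dict.get?_insert_of_ne PySem.Dict.empty 0 hp, if_neg hp]
      rfl
  have hinv0 : RelaxInv vals (PySem.Dict.empty.insert "Paul Erdos" (0 : Int)) := by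
    refine ⟨PySem.Dict.get?_insert_self PySem.Dict.empty "Paul Erdos" 0, ?_, ?_⟩
    · intro p x hgp
      rw [hget p] at hgp
      by_cases hp : p = "Paul Erdos"
      · rw [if_pos hp] at hgp
        exact ⟨0, (Option.some.inj hgp).symm, hp ▸ Reach.base⟩
      · rw [if_neg hp] at hgp; cases hgp
    · rw [PySem.Dict.keys_insert_of_not_contains PySem.Dict.empty 0 rfl]
      simp [PySem.Dict.keys_empty]
  have hfin := rounds_inv vals (PySem.Set.ofList vals.flatten).length _ hinv0
  refine ⟨⟨hfin.1, hfin.2.1, ?_⟩, hfin.2.2⟩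
  intro p k hg w hE
  obtain ⟨k0, hk0x, hk0r⟩ := hfin.2.1 p _ hg
  have hk0 : k0 = k := by exact_mod_cast hk0x.symm
  have hrp : Reach vals k p := hk0 ▸ hk0r
  obtain ⟨dl, ⟨hdr, hdmin⟩, hdle⟩ := exists_minreach hrp
  have hdV : dl + 1 ≤ (PySem.Set.ofList vals.flatten).length :=
    minreach_bound vals hguard hdr hdmin
  obtain ⟨y, hy, hgy⟩ := upper vals (PySem.Set.ofList vals.flatten).length dl p hdr (by omega)
  have hyk : y = (k : Int) := by
    rw [hg] at hgy
    exact (Option.some.inj hgy).symm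
  have hkd : k ≤ dl := by
    rw [hyk] at hy
    exact_mod_cast hy
  obtain ⟨conj, hcj, hpc, hwc, hne⟩ := hE
  have hrw : Reach vals (k + 1) w := Reach.step hrp hcj hpc hwc hne
  obtain ⟨y2, hy2, hgy2⟩ := upper vals (PySem.Set.ofList vals.flatten).length (k + 1) w hrw
    (by omega)
  obtain ⟨k2, hk2x, _⟩ := hfin.2.1 w y2 hgy2
  have hk2le : k2 ≤ k + 1 := by
    rw [hk2x] at hy2
    exact_mod_cast hy2
  exact ⟨k2, hk2le, by rw [hgy2, hk2x]⟩

-- ===== VERDICT (by name: the statement is the Claim_ definition above) =====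
theorem erdos_spec : Claim_equal_erdos := by
  intro artigos n _
  unfold Spec_erdos erdos erdos_alt
  by_cases hguard : "Paul Erdos" ∈ (PySem.Dict.ofList artigos).values.flatten
  · have hA := distA_good artigos (((graphA_char artigos).2 "Paul Erdos").mpr hguard)
    have hB := distB_good (PySem.Dict.ofList artigos).values hguard
    have hpt : ∀ p, (erdosDistA (erdosGraphA artigos)).get? p
        = (erdosDistB (PySem.Dict.ofList artigos).values).get? p := good_unique hA.1 hB.1
    have hgetD : ∀ i, (erdosDistA (erdosGraphA artigos)).getD i 0
        = (erdosDistB (PySem.Dict.ofList artigos).values).getD i 0 := by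
      intro i
      rw [PySem.Dict.getD_eq_get?_getD, PySem.Dict.getD_eq_get?_getD, hpt i]
    have hperm : (erdosDistA (erdosGraphA artigos)).keys.Perm
        (erdosDistB (PySem.Dict.ofList artigos).values).keys := by
      refine (List.perm_ext_iff_of_nodup hA.2 hB.2).mpr ?_
      intro a
      constructor
      · intro ha
        by_contra hb
        have h0 := (PySem.Dict.get?_eq_none_iff_not_mem_keys _ a).mpr hb
        rw [← hpt a] at h0
        exact ((PySem.Dict.get?_eq_none_iff_not_mem_keys _ a).mp h0) ha
      · intro hb
        by_contra ha
        have h0 := (PySem.Dict.get?_eq_none_iff_not_mem_keys _ a).mpr ha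
        rw [hpt a] at h0
        exact ((PySem.Dict.get?_eq_none_iff_not_mem_keys _ a).mp h0) hb
    have hkfun : (fun i => (erdosDistB (PySem.Dict.ofList artigos).values).getD i 0)
        = (fun i => (erdosDistA (erdosGraphA artigos)).getD i 0) :=
      funext fun i => (hgetD i).symm
    have hpfun : (fun i => decide ((erdosDistB (PySem.Dict.ofList artigos).values).getD i 0 ≤ n))
        = (fun i => decide ((erdosDistA (erdosGraphA artigos)).getD i 0 ≤ n)) :=
      funext fun i => by rw [hgetD i]
    rw [hkfun, hpfun]
    rw [sorted2_eq_sorted_lex, sorted2_eq_sorted_lex]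
    exact PySem.List.sorted_eq_sorted_of_perm _ _ _
      (lexkey_injective (fun i => (erdosDistA (erdosGraphA artigos)).getD i 0))
      (hperm.filter _)
  · have hAe : erdosDistA (erdosGraphA artigos) = PySem.Dict.empty := by
      unfold erdosDistA
      rw [if_neg (fun h => hguard (((graphA_char artigos).2 "Paul Erdos").mp h))]
    have hBe : erdosDistB (PySem.Dict.ofList artigos).values = PySem.Dict.empty := by
      unfold erdosDistB
      rw [if_neg]
      intro h
      obtain ⟨conj, hcj, hx⟩ := List.any_eq_true.mp h
      exact hguard (List.mem_flatten.mpr ⟨conj, hcj, List.contains_iff_mem.mp hx⟩)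
    rw [hAe, hBe]
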